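-- pv_equiv track=rewrite | github.com/Dave0044/pythonCS50 | 5.Libraries/bitcoin/bitcoin.py | agregar_punto_despues_coma
-- ===== SOURCE A (Python) =====
-- def agregar_punto_despues_coma(n):
--     m1 = ''
--     coma_encontrada = False
--     contador = 0
--
--     for c in n:
--         if c == ',':
--             coma_encontrada = True
--             contador = 0
--             m1 += c
--         else:
--             if coma_encontrada:
--                 if contador == 3:
--                     m1 += '.'
--                     coma_encontrada = False
--                 else:
--                     contador += 1
--             m1 += c
--
--     return m1
-- ===== SOURCE B (Python) =====
-- def agregar_punto_despues_coma(n):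
--     parts = n.split(',')
--     return ','.join([parts[0]] + [s[:3] + '.' + s[3:] if len(s) >= 4 else s for s in parts[1:]])
-- ===== Notes on version B (the rewrite author's own statement) =====
-- stated objective: faster
-- what changed: Replaced the character-by-character scan with a comma-found flag and a counter by a split on the comma separator that keeps the first segment and rejoins the rest with a dot inserted after the third character of each segment of length at least 4.
import Mathlib
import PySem

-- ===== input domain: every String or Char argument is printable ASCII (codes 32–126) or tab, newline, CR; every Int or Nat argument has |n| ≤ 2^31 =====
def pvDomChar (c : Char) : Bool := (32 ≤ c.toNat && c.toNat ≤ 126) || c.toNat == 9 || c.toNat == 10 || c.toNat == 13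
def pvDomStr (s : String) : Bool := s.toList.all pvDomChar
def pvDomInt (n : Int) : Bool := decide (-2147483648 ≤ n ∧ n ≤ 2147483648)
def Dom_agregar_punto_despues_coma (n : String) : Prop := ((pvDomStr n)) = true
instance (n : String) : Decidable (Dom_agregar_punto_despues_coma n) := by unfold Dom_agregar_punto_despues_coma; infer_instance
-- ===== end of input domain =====

-- B replaces A's flag/counter character-by-character scan by a split-on-comma, fix-each-segment,
-- rejoin decomposition (objective: faster, measured constant-factor); both are total and agree on every input.

-- ===== PORT A =====
-- one loop iteration of A: state is (m1, coma_encontrada, contador)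
def pvAStep (st : List Char × Bool × Int) (c : Char) : List Char × Bool × Int :=
  if c = ',' then (st.1 ++ [c], true, 0)
  else if st.2.1 then
    (if st.2.2 = 3 then (st.1 ++ ['.', c], false, st.2.2)
     else (st.1 ++ [c], true, st.2.2 + 1))
  else (st.1 ++ [c], false, st.2.2)

def agregar_punto_despues_coma (n : String) : String :=
  String.ofList (n.toList.foldl pvAStep ([], false, 0)).1

-- ===== PORT B =====
-- s[:3] + '.' + s[3:] if len(s) >= 4 else s
def pvFixSeg (s : List Char) : List Char :=
  if 4 ≤ s.length then PySem.List.slice s none (some 3) ++ '.' :: PySem.List.slice s (some 3) none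
  else s

-- n.split(',') ported as List.splitOn (nonempty separator), ','.join as List.intercalate
def agregar_punto_despues_coma_alt (n : String) : String :=
  match n.toList.splitOn ',' with
  | [] => ""   -- unreachable: a split is never the empty list
  | p :: rest => String.ofList (List.intercalate [','] (p :: rest.map pvFixSeg))

-- ===== PRECONDITION & SPEC =====
def Spec_agregar_punto_despues_coma (n : String) (out : String) : Prop := out = agregar_punto_despues_coma_alt n
instance (n : String) (out : String) : Decidable (Spec_agregar_punto_despues_coma n out) := by unfold Spec_agregar_punto_despues_coma; infer_instance

-- ===== CLAIM (what is proved, stated in full; the proofs are below) =====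
def Claim_equal_agregar_punto_despues_coma : Prop := ∀ (n : String), Dom_agregar_punto_despues_coma n → Spec_agregar_punto_despues_coma n (agregar_punto_despues_coma n)

-- ===== LEMMAS AND PROOFS =====

-- the accumulator of A's fold only ever grows on the right
theorem pvA_acc (cs : List Char) : ∀ (acc : List Char) (f : Bool) (k : Int),
    (cs.foldl pvAStep (acc, f, k)).1 = acc ++ (cs.foldl pvAStep ([], f, k)).1 := by
  induction cs with
  | nil => intro acc f k; simp
  | cons c cs ih =>
    intro acc f k
    have hstep : pvAStep (acc, f, k) c =
        (acc ++ (pvAStep ([], f, k) c).1, (pvAStep ([], f, k) c).2) := by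
      unfold pvAStep; split_ifs <;> simp
    rcases hdc : pvAStep ([], f, k) c with ⟨d, f', k'⟩
    rw [List.foldl_cons, List.foldl_cons, hstep, hdc]
    rw [ih (acc ++ d) f' k', ih d f' k', List.append_assoc]

-- head-segment fix when the counter is already at k: dot before the (4-k)-th char when it exists
def pvFixK (k : Nat) (s : List Char) : List Char :=
  if 4 - k ≤ s.length then s.take (3 - k) ++ '.' :: s.drop (3 - k) else s

theorem pvFixK_cons (k : Nat) (hk : k < 3) (c : Char) (p : List Char) :
    pvFixK k (c :: p) = c :: pvFixK (k + 1) p := by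
  unfold pvFixK
  by_cases h : 4 - (k + 1) ≤ p.length
  · have h' : 4 - k ≤ (c :: p).length := by simp; omega
    rw [if_pos h', if_pos h]
    have h3 : 3 - k = (3 - (k + 1)) + 1 := by omega
    rw [h3, List.take_succ_cons, List.drop_succ_cons]
    simp
  · have h' : ¬ 4 - k ≤ (c :: p).length := by simp; omega
    rw [if_neg h', if_neg h]

theorem pvFixK_nil (k : Nat) (hk : k ≤ 3) : pvFixK k [] = [] := by
  unfold pvFixK; simp; omega

theorem pvFixK_three (c : Char) (p : List Char) : pvFixK 3 (c :: p) = '.' :: c :: p := by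
  unfold pvFixK; simp

theorem pvInterc_cons (c : Char) (p : List Char) (xs : List (List Char)) :
    List.intercalate [','] ((c :: p) :: xs) = c :: List.intercalate [','] (p :: xs) := by
  cases xs with
  | nil => simp [List.intercalate]
  | cons y ys => simp [List.intercalate, List.intersperse]

theorem pvInterc_comma (x : List Char) (xs : List (List Char)) :
    List.intercalate [','] ([] :: x :: xs) = ',' :: List.intercalate [','] (x :: xs) := by
  simp [List.intercalate, List.intersperse]

-- core invariant: A's fold from each reachable state, against split / fix / join of the rest
theorem pvMain (cs : List Char) :
    (∀ k : Int, (cs.foldl pvAStep ([], false, k)).1 =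
      (match cs.splitOn ',' with
       | [] => []
       | p :: rest => List.intercalate [','] (p :: rest.map (pvFixK 0)))) ∧
    (∀ k : Nat, k ≤ 3 → (cs.foldl pvAStep ([], true, (k : Int))).1 =
      (match cs.splitOn ',' with
       | [] => []
       | p :: rest => List.intercalate [','] (pvFixK k p :: rest.map (pvFixK 0)))) := by
  induction cs with
  | nil =>
    refine ⟨fun k => ?_, fun k hk => ?_⟩
    · rw [List.splitOn_nil]; simp [List.intercalate]
    · rw [List.splitOn_nil]; simp [List.intercalate, pvFixK_nil k hk]
  | cons c cs ih =>
    obtain ⟨ihF, ihT⟩ := ih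
    obtain ⟨p, rest, hps⟩ : ∃ p rest, cs.splitOn ',' = p :: rest := by
      cases h : cs.splitOn ',' with
      | nil => exact absurd h (List.splitOnP_ne_nil _ _)
      | cons a b => exact ⟨a, b, rfl⟩
    have hps' : List.splitOnP (fun x => x == ',') cs = p :: rest := by
      simpa [List.splitOn] using hps
    have hcons : (c :: cs).splitOn ',' =
        if c = ',' then [] :: (p :: rest) else (c :: p) :: rest := by
      by_cases hc : c = ','
      · simp [List.splitOn, List.splitOnP_cons, hc, hps']
      · simp [List.splitOn, List.splitOnP_cons, hc, hps', List.modifyHead]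
    have hT0 : (cs.foldl pvAStep ([], true, (0 : Int))).1 =
        List.intercalate [','] (pvFixK 0 p :: rest.map (pvFixK 0)) := by
      have h := ihT 0 (by norm_num)
      rw [hps] at h
      simpa using h
    by_cases hc : c = ','
    · -- comma: both modes emit ',' and restart the counter at 0
      have hstep : ∀ f k, pvAStep ([], f, k) c = ([','], true, 0) := by
        intro f k; simp [pvAStep, hc]
      refine ⟨fun k => ?_, fun k hk => ?_⟩
      · rw [List.foldl_cons, hstep, pvA_acc, hT0, hcons, if_pos hc]
        simp [pvInterc_comma]
      · rw [List.foldl_cons, hstep, pvA_acc, hT0, hcons, if_pos hc]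
        simp [pvFixK_nil k hk, pvInterc_comma]
    · refine ⟨fun k => ?_, fun k hk => ?_⟩
      · -- flag off: the char passes through unchanged
        have hstep : pvAStep ([], false, k) c = ([c], false, k) := by
          simp [pvAStep, hc]
        have h := ihF k
        rw [hps] at h
        rw [List.foldl_cons, hstep, pvA_acc, h, hcons, if_neg hc]
        simp [pvInterc_cons]
      · by_cases h3 : k = 3
        · -- counter hit 3: insert the dot, flag goes off
          subst h3
          have hstep : pvAStep ([], true, ((3 : Nat) : Int)) c = (['.', c], false, 3) := by
            simp [pvAStep, hc]
          have h := ihF 3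
          rw [hps] at h
          rw [List.foldl_cons, hstep, pvA_acc, h, hcons, if_neg hc]
          simp [pvFixK_three, pvInterc_cons]
        · -- counter below 3: count the char
          have hstep : pvAStep ([], true, ((k : Nat) : Int)) c = ([c], true, (k : Int) + 1) := by
            have : ((k : Int) ≠ 3) := by omega
            simp [pvAStep, hc, this]
          have h := ihT (k + 1) (by omega)
          rw [hps] at h
          push_cast at h
          rw [List.foldl_cons, hstep, pvA_acc, h, hcons, if_neg hc]
          simp [pvFixK_cons k (by omega), pvInterc_cons]
-- B's per-segment slices are exactly take 3 / drop 3
theorem pvFixSeg_eq (s : List Char) : pvFixSeg s = pvFixK 0 s := by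
  unfold pvFixSeg pvFixK
  rw [show (some (3 : Int)) = some (((3 : Nat) : Int)) by norm_num,
    PySem.List.slice_to_natCast, PySem.List.slice_from_natCast]

-- ===== VERDICT (by name: the statement is the Claim_ definition above) =====
theorem agregar_punto_despues_coma_spec : Claim_equal_agregar_punto_despues_coma := by
  intro n _
  unfold Spec_agregar_punto_despues_coma agregar_punto_despues_coma agregar_punto_despues_coma_alt
  have h := (pvMain n.toList).1 0
  cases hps : n.toList.splitOn ',' with
  | nil => exact absurd hps (List.splitOnP_ne_nil _ _)
  | cons p rest =>
    rw [hps] at h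
    have hm : rest.map pvFixSeg = rest.map (pvFixK 0) := List.map_congr_left fun s _ => pvFixSeg_eq s
    simp only [h, hm]
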